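-- pv_equiv track=rewrite | github.com/manivija/python_progs | G_problem_3_1.py | answer_eq
-- ===== SOURCE A (Python) =====
-- def answer_eq(xx, ss):
--
--     def f(a):
--         res = [a,1,a+1,0]
--         return res[a%4]
--
--     def getXor(a, b):
--          return f(b)^f(a-1)
--
--     cumulativeXor = 0
--     cumulativeXor_Eq = 0
--     length = ss
--     beginEntry = xx
--     for j in range(0, length):
--         start = beginEntry + j * length
--         end = beginEntry + j * length + length - (j + 1) + 1
--         # for entry in range(start,end):
--         #     cumulativeXor ^= entry
--         cumulativeXor_Eq ^= getXor(start, end - 1)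
--     return cumulativeXor_Eq
-- ===== SOURCE B (Python) =====
-- def answer_eq(xx, ss):
--     # XOR of any aligned block {4t, 4t+1, 4t+2, 4t+3} is 0, so per row only the
--     # ragged edge elements need XOR-ing; the aligned middle cancels wholesale.
--     result = 0
--     for j in range(ss):
--         start = xx + j * ss
--         end = start + ss - j
--         cut = start + (-start) % 4          # first multiple of 4 >= start
--         if cut > end:
--             cut = end
--         for entry in range(start, cut):     # ragged head (< 4 elements)
--             result ^= entry
--         tail = cut + (end - cut) // 4 * 4   # aligned blocks [cut, tail) cancel
--         for entry in range(tail, end):      # ragged tail (< 4 elements)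
--             result ^= entry
--     return result
-- ===== Notes on version B (the rewrite author's own statement) =====
-- stated objective: alternative
-- what changed: B drops A's prefix-XOR helper f/getXor entirely and XORs the actual elements of each row directly, skipping the aligned middle [cut,tail) because every aligned block {4t,4t+1,4t+2,4t+3} XORs to 0, so only the <4 ragged head and <4 ragged tail elements are touched.
import Mathlib
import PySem

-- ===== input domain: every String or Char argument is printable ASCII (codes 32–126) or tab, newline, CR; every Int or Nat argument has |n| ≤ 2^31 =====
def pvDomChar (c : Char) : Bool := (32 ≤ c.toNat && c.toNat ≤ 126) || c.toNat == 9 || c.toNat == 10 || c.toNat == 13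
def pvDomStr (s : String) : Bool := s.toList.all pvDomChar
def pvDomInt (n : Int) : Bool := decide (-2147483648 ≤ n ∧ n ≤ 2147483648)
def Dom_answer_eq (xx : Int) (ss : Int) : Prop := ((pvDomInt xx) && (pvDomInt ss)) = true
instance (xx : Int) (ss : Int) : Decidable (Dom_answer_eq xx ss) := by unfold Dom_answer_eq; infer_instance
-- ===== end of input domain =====

-- B drops A's prefix-XOR helper f/getXor and XORs each row's actual elements directly,
-- skipping the aligned middle: every block {4t,..,4t+3} XORs to 0, so only the ragged
-- head and tail (< 4 elements each) of a row are XOR-ed.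


-- ===== PORT A =====
-- f(a) = [a, 1, a+1, 0][a % 4]; a % 4 is always in 0..3, so the Python index never
-- raises and pyGetD (default never used) is an exact port of the subscript.
def pvF (a : Int) : Int :=
  PySem.List.pyGetD ([a, 1, a + 1, 0] : List Int) (PySem.Int.mod a 4) 0

def pvGetXor (a b : Int) : Int := PySem.Int.bxor (pvF b) (pvF (a - 1))

def answer_eq (xx : Int) (ss : Int) : Int :=
  (PySem.List.pyRange 0 ss 1).foldl
    (fun cumulativeXor_Eq j =>
      let start := xx + j * ss
      let «end» := xx + j * ss + ss - (j + 1) + 1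
      PySem.Int.bxor cumulativeXor_Eq (pvGetXor start («end» - 1)))
    0

-- ===== PORT B =====
-- per row: XOR ragged head [start, cut) and ragged tail [tail, end); the aligned
-- middle [cut, tail) cancels (each {4t,..,4t+3} XORs to 0)
def answer_eq_alt (xx : Int) (ss : Int) : Int :=
  (PySem.List.pyRange 0 ss 1).foldl
    (fun result j =>
      let start := xx + j * ss
      let «end» := start + ss - j
      let cut := start + PySem.Int.mod (-start) 4
      let cut := if cut > «end» then «end» else cut
      let result := (PySem.List.pyRange start cut 1).foldl
        (fun r entry => PySem.Int.bxor r entry) result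
      let tail := cut + PySem.Int.floordiv («end» - cut) 4 * 4
      (PySem.List.pyRange tail «end» 1).foldl
        (fun r entry => PySem.Int.bxor r entry) result)
    0

-- ===== PRECONDITION & SPEC =====
def Spec_answer_eq (xx : Int) (ss : Int) (out : Int) : Prop := out = answer_eq_alt xx ss
instance (xx : Int) (ss : Int) (out : Int) : Decidable (Spec_answer_eq xx ss out) := by unfold Spec_answer_eq; infer_instance

-- ===== CLAIM (what is proved, stated in full; the proofs are below) =====
def Claim_equal_answer_eq : Prop := ∀ (xx : Int) (ss : Int), Dom_answer_eq xx ss → Spec_answer_eq xx ss (answer_eq xx ss)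

-- ===== LEMMAS AND PROOFS =====

-- sign/magnitude encoding of Int: dec false n = n, dec true n = -n-1
def pvDec : Bool → Nat → Int
  | false, n => (n : Int)
  | true,  n => -(n : Int) - 1

theorem pvDec_surj (a : Int) : ∃ s n, a = pvDec s n := by
  rcases le_or_gt 0 a with h | h
  · exact ⟨false, a.toNat, by simp only [pvDec]; omega⟩
  · exact ⟨true, (-a - 1).toNat, by simp only [pvDec]; omega⟩

theorem bxor_dec (s1 s2 : Bool) (n1 n2 : Nat) :
    PySem.Int.bxor (pvDec s1 n1) (pvDec s2 n2) = pvDec (s1 ^^ s2) (n1 ^^^ n2) := by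
  cases s1 <;> cases s2
  · exact PySem.Int.bxor_natCast n1 n2
  · simp only [pvDec, Bool.xor_true, Bool.not_false, PySem.Int.bxor]
    rw [if_pos (Int.natCast_nonneg n1), if_neg (by omega),
        show (-(-(n2 : Int) - 1) - 1).toNat = n2 by omega,
        show ((n1 : Int)).toNat = n1 by omega]
  · simp only [pvDec, Bool.true_xor, Bool.not_false, PySem.Int.bxor]
    rw [if_neg (by omega), if_pos (Int.natCast_nonneg n2),
        show (-(-(n1 : Int) - 1) - 1).toNat = n1 by omega,
        show ((n2 : Int)).toNat = n2 by omega]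
  · simp only [pvDec, Bool.xor_true, Bool.not_true, PySem.Int.bxor]
    rw [if_neg (by omega), if_neg (by omega),
        show (-(-(n1 : Int) - 1) - 1).toNat = n1 by omega,
        show (-(-(n2 : Int) - 1) - 1).toNat = n2 by omega]

theorem bxor_assoc (a b c : Int) :
    PySem.Int.bxor (PySem.Int.bxor a b) c = PySem.Int.bxor a (PySem.Int.bxor b c) := by
  obtain ⟨sa, na, rfl⟩ := pvDec_surj a
  obtain ⟨sb, nb, rfl⟩ := pvDec_surj b
  obtain ⟨sc, nc, rfl⟩ := pvDec_surj c
  simp only [bxor_dec, Bool.xor_assoc, Nat.xor_assoc]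

theorem nat_xor_one_even (k : Nat) : 2 * k ^^^ 1 = 2 * k + 1 := by
  apply Nat.eq_of_testBit_eq; intro i
  cases i with
  | zero => simp [Nat.testBit_zero]
  | succ j => simp [Nat.testBit_succ]

theorem nat_xor_one_odd (k : Nat) : (2 * k + 1) ^^^ 1 = 2 * k := by
  rw [← nat_xor_one_even, Nat.xor_assoc, Nat.xor_self, Nat.xor_zero]

theorem nat_xor_consec (k : Nat) : 2 * k ^^^ (2 * k + 1) = 1 := by
  rw [← nat_xor_one_even, ← Nat.xor_assoc, Nat.xor_self, Nat.zero_xor]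

theorem pyMod_four (a : Int) : PySem.Int.mod a 4 = a % 4 := by
  simp [PySem.Int.mod, Int.fmod_eq_emod]

theorem pvF_eq0 (m : Int) (h : m % 4 = 0) : pvF m = m := by
  unfold pvF; rw [pyMod_four, h]; rfl
theorem pvF_eq1 (m : Int) (h : m % 4 = 1) : pvF m = 1 := by
  unfold pvF; rw [pyMod_four, h]; rfl
theorem pvF_eq2 (m : Int) (h : m % 4 = 2) : pvF m = m + 1 := by
  unfold pvF; rw [pyMod_four, h]; rfl
theorem pvF_eq3 (m : Int) (h : m % 4 = 3) : pvF m = 0 := by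
  unfold pvF; rw [pyMod_four, h]; rfl

-- one even-odd step: 1 ^ m = m + 1 for even m (needed in pvF_step)
theorem bxor_one_even (m : Int) (h : m % 2 = 0) : PySem.Int.bxor 1 m = m + 1 := by
  rcases le_or_gt 0 m with hm | hm
  · obtain ⟨k, hk⟩ : ∃ k : Nat, m = 2 * (k : Int) := ⟨(m / 2).toNat, by omega⟩
    rw [show (1 : Int) = pvDec false 1 by rfl,
        show m = pvDec false (2 * k) by simp only [pvDec]; omega,
        bxor_dec, Nat.xor_comm, nat_xor_one_even]
    simp only [Bool.xor_false, pvDec]; omega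
  · obtain ⟨k, hk⟩ : ∃ k : Nat, m = -(2 * (k : Int)) - 2 := ⟨((-m - 2) / 2).toNat, by omega⟩
    rw [show (1 : Int) = pvDec false 1 by rfl,
        show m = pvDec true (2 * k + 1) by simp only [pvDec]; omega,
        bxor_dec, Nat.xor_comm, nat_xor_one_odd]
    simp only [Bool.xor_true, Bool.not_false, pvDec]; omega

-- P(m-1) ^ m = P(m): the single-step identity behind A's closed form, for all integers.
theorem pvF_step (m : Int) : PySem.Int.bxor (pvF (m - 1)) m = pvF m := by
  have h4 : m % 4 = 0 ∨ m % 4 = 1 ∨ m % 4 = 2 ∨ m % 4 = 3 := by omega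
  rcases h4 with h | h | h | h
  · rw [pvF_eq0 m h, pvF_eq3 (m - 1) (by omega), PySem.Int.bxor_comm]
    exact PySem.Int.bxor_zero m
  · -- m odd: (m-1) ^ m = 1
    rw [pvF_eq1 m h, pvF_eq0 (m - 1) (by omega)]
    rcases le_or_gt 0 (m - 1) with hm | hm
    · obtain ⟨k, hk⟩ : ∃ k : Nat, m = 2 * (k : Int) + 1 := ⟨((m - 1) / 2).toNat, by omega⟩
      rw [show m - 1 = pvDec false (2 * k) by simp only [pvDec]; omega,
          show m = pvDec false (2 * k + 1) by simp only [pvDec]; omega,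
          bxor_dec, nat_xor_consec]
      rfl
    · obtain ⟨k, hk⟩ : ∃ k : Nat, m = -(2 * (k : Int)) - 1 := ⟨((-m - 1) / 2).toNat, by omega⟩
      rw [show m - 1 = pvDec true (2 * k + 1) by simp only [pvDec]; omega,
          show m = pvDec true (2 * k) by simp only [pvDec]; omega,
          bxor_dec, Nat.xor_comm, nat_xor_consec]
      rfl
  · rw [pvF_eq2 m h, pvF_eq1 (m - 1) (by omega)]
    exact bxor_one_even m (by omega)
  · rw [pvF_eq3 m h, pvF_eq2 (m - 1) (by omega),
        show m - 1 + 1 = m by ring]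
    exact PySem.Int.bxor_self m

-- pvG s e = XOR of range(s, e) in A's closed form
def pvG (s e : Int) : Int := PySem.Int.bxor (pvF (e - 1)) (pvF (s - 1))

theorem pvG_step (s m : Int) : PySem.Int.bxor (pvG s m) m = pvG s (m + 1) := by
  unfold pvG
  rw [show m + 1 - 1 = m by ring, bxor_assoc, PySem.Int.bxor_comm (pvF (s - 1)) m,
      ← bxor_assoc, pvF_step]

theorem bxor_zero_left (a : Int) : PySem.Int.bxor 0 a = a := by
  rw [PySem.Int.bxor_comm]; exact PySem.Int.bxor_zero a

theorem pvG_split (s m e : Int) :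
    PySem.Int.bxor (pvG s m) (pvG m e) = pvG s e := by
  unfold pvG
  rw [PySem.Int.bxor_comm (pvF (e - 1)) (pvF (m - 1)), bxor_assoc, ← bxor_assoc (pvF (s - 1)),
      PySem.Int.bxor_comm (pvF (s - 1)) (pvF (m - 1)), bxor_assoc (pvF (m - 1)),
      ← bxor_assoc, PySem.Int.bxor_self, bxor_zero_left, PySem.Int.bxor_comm]

-- an aligned interval's XOR is 0: both bounds ≡ 0 (mod 4) put pvF in its zero case
theorem pvG_aligned (c t : Int) (hc : c % 4 = 0) (ht : t % 4 = 0) : pvG c t = 0 := by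
  unfold pvG
  rw [pvF_eq3 (t - 1) (by omega), pvF_eq3 (c - 1) (by omega)]
  exact PySem.Int.bxor_self 0

-- the elementwise inner loop computes A's closed form
theorem foldl_bxor_range (k : Nat) : ∀ (s acc : Int),
    (PySem.List.pyRange s (s + (k : Int)) 1).foldl
      (fun r entry => PySem.Int.bxor r entry) acc = PySem.Int.bxor acc (pvG s (s + k)) := by
  induction k with
  | zero =>
    intro s acc
    rw [show s + ((0 : Nat) : Int) = s by push_cast; ring,
        PySem.List.pyRange_one_eq_nil (le_refl s)]
    simp only [List.foldl_nil, pvG, PySem.Int.bxor_self, PySem.Int.bxor_zero]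
  | succ n ih =>
    intro s acc
    rw [show s + ((n + 1 : Nat) : Int) = (s + (n : Int)) + 1 by push_cast; ring,
        PySem.List.pyRange_one_succ_right (by omega), List.foldl_append, ih s acc]
    simp only [List.foldl_cons, List.foldl_nil]
    rw [bxor_assoc, pvG_step]

theorem foldl_bxor_range' (s e acc : Int) (h : s ≤ e) :
    (PySem.List.pyRange s e 1).foldl
      (fun r entry => PySem.Int.bxor r entry) acc = PySem.Int.bxor acc (pvG s e) := by
  have hk := foldl_bxor_range (e - s).toNat s acc
  rw [show s + (((e - s).toNat : Nat) : Int) = e by omega] at hk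
  exact hk

theorem pyMod_neg_four (a : Int) : PySem.Int.mod (-a) 4 = (-a) % 4 := by
  simp [PySem.Int.mod, Int.fmod_eq_emod]

theorem pyFdiv_four (a : Int) : PySem.Int.floordiv a 4 = a / 4 := by
  simp [PySem.Int.floordiv, Int.fdiv_eq_ediv]

theorem inner_eq (xx ss j result : Int) (hj : j < ss) :
    (let start := xx + j * ss
     let «end» := start + ss - j
     let cut := start + PySem.Int.mod (-start) 4
     let cut := if cut > «end» then «end» else cut
     let result := (PySem.List.pyRange start cut 1).foldl
       (fun r entry => PySem.Int.bxor r entry) result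
     let tail := cut + PySem.Int.floordiv («end» - cut) 4 * 4
     (PySem.List.pyRange tail «end» 1).foldl
       (fun r entry => PySem.Int.bxor r entry) result)
      = PySem.Int.bxor result (pvGetXor (xx + j * ss) (xx + j * ss + ss - (j + 1) + 1 - 1)) := by
  simp only [pyMod_neg_four, pyFdiv_four]
  set s := xx + j * ss with hs
  set e := s + ss - j with he
  have hse : s ≤ e := by omega
  have hGetXor : pvGetXor s (s + ss - (j + 1) + 1 - 1) = pvG s e := by
    unfold pvGetXor pvG
    rw [show s + ss - (j + 1) + 1 - 1 = e - 1 by omega]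
  have hm : 0 ≤ (-s) % 4 ∧ (-s) % 4 < 4 :=
    ⟨Int.emod_nonneg _ (by norm_num), Int.emod_lt_of_pos _ (by norm_num)⟩
  by_cases hcut : s + (-s) % 4 > e
  · -- whole row is ragged head; the tail range is empty
    rw [if_pos hcut, show e + (e - e) / 4 * 4 = e by omega,
        PySem.List.pyRange_one_eq_nil (le_refl e), List.foldl_nil,
        foldl_bxor_range' s e result hse, hGetXor]
  · rw [if_neg hcut]
    set c := s + (-s) % 4 with hc
    have hc4 : c % 4 = 0 := by omega
    have hsc : s ≤ c := by omega
    have hce : c ≤ e := by omega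
    set t := c + (e - c) / 4 * 4 with ht
    have hct : c ≤ t := by
      have h0 : (0 : Int) ≤ (e - c) / 4 := Int.ediv_nonneg (by omega) (by norm_num)
      omega
    have hte : t ≤ e := by omega
    have ht4 : t % 4 = 0 := by omega
    rw [foldl_bxor_range' s c result hsc, foldl_bxor_range' t e _ hte, hGetXor,
        bxor_assoc, ← pvG_split s c e, ← pvG_split c t e, pvG_aligned c t hc4 ht4, bxor_zero_left]

theorem answer_eq_spec' (xx ss : Int) : answer_eq xx ss = answer_eq_alt xx ss := by
  unfold answer_eq answer_eq_alt
  rw [PySem.List.foldl_congr_mem]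
  intro acc j hj
  rw [PySem.List.mem_pyRange_one] at hj
  exact (inner_eq xx ss j acc hj.2).symm

-- ===== VERDICT (by name: the statement is the Claim_ definition above) =====
theorem answer_eq_spec : Claim_equal_answer_eq := by
  intro xx ss _
  unfold Spec_answer_eq
  exact answer_eq_spec' xx ss
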